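-- pv_equiv track=rewrite | github.com/rodolfopalma/temporal-attention-modules | joint-preprocessing.py | get_parsed_supporting_facts
-- ===== SOURCE A (Python) =====
-- def get_parsed_supporting_facts(raw_supportings, q_ids):
--     supporting = []
--     for raw_supporting in raw_supportings:
--         offset = 0
--         for q_id in q_ids:
--             if raw_supporting > q_id:
--                 offset += 1
--         supporting.append(raw_supporting - offset)
--     return supporting
-- ===== SOURCE B (Python) =====
-- def get_parsed_supporting_facts(raw_supportings, q_ids):
--     sq = sorted(q_ids)
--
--     def bisect_left(a, x):
--         lo, hi = 0, len(a)
--         while lo < hi: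
--             mid = (lo + hi) // 2
--             if a[mid] < x:
--                 lo = mid + 1
--             else:
--                 hi = mid
--         return lo
--
--     return [r - bisect_left(sq, r) for r in raw_supportings]
-- ===== Notes on version B (the rewrite author's own statement) =====
-- stated objective: faster
-- what changed: Sorts q_ids once and replaces A's inner linear scan per element with a binary search (bisect_left) on the sorted list.
import Mathlib
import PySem

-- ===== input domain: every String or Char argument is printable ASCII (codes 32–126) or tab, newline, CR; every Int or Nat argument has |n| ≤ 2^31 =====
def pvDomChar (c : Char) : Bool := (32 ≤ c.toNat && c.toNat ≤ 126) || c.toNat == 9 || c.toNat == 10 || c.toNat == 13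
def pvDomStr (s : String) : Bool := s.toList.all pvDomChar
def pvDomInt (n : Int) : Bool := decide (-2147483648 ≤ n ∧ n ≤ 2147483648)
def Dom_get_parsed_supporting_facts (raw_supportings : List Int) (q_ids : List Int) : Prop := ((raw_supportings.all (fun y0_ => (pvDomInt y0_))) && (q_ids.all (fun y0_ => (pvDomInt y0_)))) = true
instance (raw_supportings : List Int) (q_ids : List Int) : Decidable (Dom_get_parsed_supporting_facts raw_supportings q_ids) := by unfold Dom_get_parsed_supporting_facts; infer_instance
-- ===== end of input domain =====

-- B sorts q_ids once and uses a hand-written bisect_left (binary search) per element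
-- instead of A's inner linear scan: objective 'faster'.


-- ===== PORT A =====
def get_parsed_supporting_facts (raw_supportings : List Int) (q_ids : List Int) : List Int :=
  raw_supportings.foldl (fun supporting raw_supporting =>
    let offset : Int :=
      q_ids.foldl (fun offset q_id => if raw_supporting > q_id then offset + 1 else offset) 0
    supporting ++ [raw_supporting - offset]) []

-- ===== PORT B =====
-- Source B's hand-written bisect_left while-loop; a[mid] is always in range here
-- (0 ≤ lo ≤ mid < hi ≤ len a on every call from get_parsed_supporting_facts_alt),
-- so List.getD mid 0 is exact for Python's a[mid].
def bisectLeftGo (a : List Int) (x : Int) (lo hi : Nat) : Nat :=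
  if lo < hi then
    let mid := (lo + hi) / 2
    if a.getD mid 0 < x then bisectLeftGo a x (mid + 1) hi
    else bisectLeftGo a x lo mid
  else lo
termination_by hi - lo
decreasing_by all_goals omega

def get_parsed_supporting_facts_alt (raw_supportings : List Int) (q_ids : List Int) : List Int :=
  let sq := PySem.List.sorted q_ids (fun x => x) false
  raw_supportings.map (fun r => r - (bisectLeftGo sq r 0 sq.length : Int))

-- ===== PRECONDITION & SPEC =====
def Spec_get_parsed_supporting_facts (raw_supportings : List Int) (q_ids : List Int) (out : List Int) : Prop := out = get_parsed_supporting_facts_alt raw_supportings q_ids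
instance (raw_supportings : List Int) (q_ids : List Int) (out : List Int) : Decidable (Spec_get_parsed_supporting_facts raw_supportings q_ids out) := by unfold Spec_get_parsed_supporting_facts; infer_instance

-- ===== CLAIM (what is proved, stated in full; the proofs are below) =====
def Claim_equal_get_parsed_supporting_facts : Prop := ∀ (raw_supportings : List Int) (q_ids : List Int), Dom_get_parsed_supporting_facts raw_supportings q_ids → Spec_get_parsed_supporting_facts raw_supportings q_ids (get_parsed_supporting_facts raw_supportings q_ids)

-- ===== LEMMAS AND PROOFS =====

-- A's inner loop counts the q_ids strictly below r.
theorem foldl_count_eq (r : Int) (qs : List Int) (init : Int) :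
    qs.foldl (fun offset q_id => if r > q_id then offset + 1 else offset) init
      = init + (qs.countP (fun q => decide (q < r)) : Int) := by
  induction qs generalizing init with
  | nil => simp
  | cons q t ih =>
    simp only [List.foldl_cons, List.countP_cons, ih]
    by_cases h : q < r <;> (simp [h]; try ring)

-- If the first k positions satisfy q < x and the rest do not, countP is k.
theorem countP_eq_split (a : List Int) (x : Int) (k : Nat) (hk : k ≤ a.length)
    (h1 : ∀ j, j < k → (hj : j < a.length) → a[j] < x)
    (h2 : ∀ j, k ≤ j → (hj : j < a.length) → x ≤ a[j]) :
    a.countP (fun q => decide (q < x)) = k := by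
  induction a generalizing k with
  | nil => simp only [List.countP_nil, List.length_nil] at *; omega
  | cons q t ih =>
    cases k with
    | zero =>
      simp only [List.countP_cons]
      have hz : t.countP (fun q => decide (q < x)) = 0 := by
        rw [List.countP_eq_zero]
        intro b hb
        obtain ⟨j, hj, rfl⟩ := List.mem_iff_getElem.mp hb
        have := h2 (j + 1) (by omega) (by simpa using Nat.succ_lt_succ hj)
        simp only [List.getElem_cons_succ] at this
        simp; omega
      have hq : x ≤ q := by
        have := h2 0 (by omega) (by simp)
        simpa using this
      simp [hz, show ¬ q < x by omega]
    | succ k' =>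
      have hq : q < x := by
        have := h1 0 (by omega) (by simp)
        simpa using this
      simp only [List.countP_cons, hq, decide_true, if_pos]
      have := ih k' (by simpa using Nat.le_of_succ_le_succ hk)
        (fun j hj hjl => by
          have := h1 (j + 1) (by omega) (by simpa using Nat.succ_lt_succ hjl)
          simpa using this)
        (fun j hj hjl => by
          have := h2 (j + 1) (by omega) (by simpa using Nat.succ_lt_succ hjl)
          simpa using this)
      simp [this]

-- Binary-search invariant: on a ≤-sorted list the loop lands exactly on the
-- count of elements strictly below x.
theorem bisectLeftGo_eq (a : List Int) (x : Int) (hs : a.Pairwise (· ≤ ·)) :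
    ∀ n lo hi, hi - lo = n → lo ≤ hi → hi ≤ a.length →
    (∀ j, j < lo → (hj : j < a.length) → a[j] < x) →
    (∀ j, hi ≤ j → (hj : j < a.length) → x ≤ a[j]) →
    bisectLeftGo a x lo hi = a.countP (fun q => decide (q < x)) := by
  have hmono := List.pairwise_iff_getElem.mp hs
  intro n
  induction n using Nat.strong_induction_on with
  | _ n ih =>
    intro lo hi hn hle hhi h1 h2
    rw [bisectLeftGo]
    by_cases hlt : lo < hi
    · simp only [hlt, if_true]
      have hmidlt : (lo + hi) / 2 < a.length := by omega
      rw [List.getD_eq_getElem a 0 hmidlt]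
      by_cases hc : a[(lo + hi) / 2] < x
      · simp only [hc, if_pos]
        refine ih (hi - ((lo + hi) / 2 + 1)) (by omega) _ _ rfl (by omega) hhi ?_ h2
        intro j hj hjl
        rcases Nat.lt_or_ge j lo with h | h
        · exact h1 j h hjl
        · rcases Nat.lt_or_ge j ((lo + hi) / 2) with h' | h'
          · exact lt_of_le_of_lt (hmono j ((lo + hi) / 2) hjl hmidlt h') hc
          · have : j = (lo + hi) / 2 := by omega
            simpa [this] using hc
      · simp only [hc, if_false]
        refine ih ((lo + hi) / 2 - lo) (by omega) _ _ rfl (by omega) (by omega) h1 ?_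
        intro j hj hjl
        rcases Nat.lt_or_ge j hi with h | h
        · calc x ≤ a[(lo + hi) / 2] := by omega
            _ ≤ a[j] := by
              rcases Nat.lt_or_ge ((lo + hi) / 2) j with h' | h'
              · exact hmono ((lo + hi) / 2) j hmidlt hjl h'
              · have : j = (lo + hi) / 2 := by omega
                simp [this]
        · exact h2 j h hjl
    · simp only [hlt, if_false]
      exact (countP_eq_split a x lo (by omega) h1 (fun j hj hjl => h2 j (by omega) hjl)).symm

-- A's outer append-fold is a map.
theorem foldl_append_map (rs : List Int) (g : Int → Int) (acc : List Int) :
    rs.foldl (fun s r => s ++ [g r]) acc = acc ++ rs.map g := by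
  induction rs generalizing acc with
  | nil => simp
  | cons r t ih => simp [ih]

-- ===== VERDICT (by name: the statement is the Claim_ definition above) =====
theorem get_parsed_supporting_facts_spec : Claim_equal_get_parsed_supporting_facts := by
  intro rs qs _
  unfold Spec_get_parsed_supporting_facts get_parsed_supporting_facts get_parsed_supporting_facts_alt
  simp only []
  set sq := PySem.List.sorted qs (fun x => x) false with hsq
  have hperm : sq.Perm qs := PySem.List.sorted_perm qs (fun x => x) false
  have hpw : sq.Pairwise (· ≤ ·) := by
    have := PySem.List.sorted_pairwise qs (fun x => x)
    simpa [hsq] using this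
  rw [foldl_append_map rs _ []]
  simp only [List.nil_append]
  apply List.map_congr_left
  intro r _
  have hb : bisectLeftGo sq r 0 sq.length = sq.countP (fun q => decide (q < r)) :=
    bisectLeftGo_eq sq r hpw sq.length 0 sq.length (by omega) (by omega) (le_refl _)
      (fun j hj _ => by omega) (fun j hj hjl => by omega)
  have hcp : sq.countP (fun q => decide (q < r)) = qs.countP (fun q => decide (q < r)) :=
    hperm.countP_eq _
  rw [foldl_count_eq r qs 0, hb, hcp]
  ring
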